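-- pv_equiv track=rewrite | github.com/mrraghur/interviewpreptests | May2022/MinNoOfOperationsToMakeArrayIncreasing/main.py | solutionGold
-- ===== SOURCE A (Python) =====
-- def solutionGold(nums):
--     count=0
--     nums=list(map(int, nums))
--     for i in range(len(nums)-1):
--         if nums[i+1]<=nums[i]:
--             count+=nums[i]-nums[i+1]+1
--             nums[i+1]+=nums[i]-nums[i+1]+1
--     return count
-- ===== SOURCE B (Python) =====
-- def solutionGold(nums):
--     # Shift transform: subtracting the index turns "strictly increasing" into
--     # "non-decreasing"; each element must be raised to the running maximum of
--     # the shifted values, so the answer is the sum of gaps to that prefix max.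
--     keys = [int(x) - i for i, x in enumerate(nums)]
--     if not keys:
--         return 0
--     total = 0
--     m = keys[0]
--     for k in keys:
--         m = max(m, k)
--         total += m - k
--     return total
-- ===== Notes on version B (the rewrite author's own statement) =====
-- stated objective: alternative
-- what changed: B first applies the classic index-shift transform (keys[i] = int(nums[i]) - i), reducing the problem to summing each key's gap to the running prefix maximum, instead of A's greedy pass that bumps elements in a mutated list copy via an if-branch.
import Mathlib
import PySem

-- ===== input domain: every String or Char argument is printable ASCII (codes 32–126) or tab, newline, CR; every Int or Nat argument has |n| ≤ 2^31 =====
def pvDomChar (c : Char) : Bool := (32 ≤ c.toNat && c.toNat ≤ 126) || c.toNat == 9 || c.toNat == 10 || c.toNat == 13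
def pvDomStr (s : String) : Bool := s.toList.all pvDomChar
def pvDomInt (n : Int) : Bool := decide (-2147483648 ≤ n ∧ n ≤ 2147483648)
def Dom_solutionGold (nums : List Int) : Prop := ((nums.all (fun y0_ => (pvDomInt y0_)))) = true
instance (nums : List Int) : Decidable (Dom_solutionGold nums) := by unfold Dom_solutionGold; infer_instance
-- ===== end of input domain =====

-- B reduces the problem via the index-shift transform (keys[i] = nums[i] - i) to summing
-- each key's gap to the running prefix maximum, instead of A's greedy bump-in-place pass.

-- ===== PORT A =====
-- A's loop body: reads nums[i] and nums[i+1], may bump nums[i+1] in place and add to count.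
def solutionGoldStep (s : List Int × Int) (i : Int) : List Int × Int :=
  match PySem.List.pyGet? s.1 (i + 1), PySem.List.pyGet? s.1 i with
  | some b, some a =>
      if b ≤ a then (s.1.set (i + 1).toNat (b + (a - b + 1)), s.2 + (a - b + 1))
      else s
  | _, _ => s

-- `list(map(int, nums))` is the identity on a list of ints; the copy is the fold's list state.
def solutionGold (nums : List Int) : Int :=
  ((PySem.List.pyRange 0 ((nums.length : Int) - 1) 1).foldl solutionGoldStep (nums, 0)).2

-- ===== PORT B =====
-- B's loop body over the shifted keys: state (running max m, total); adds m - k.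
def solutionGoldAltStep (s : Int × Int) (k : Int) : Int × Int :=
  let m := max s.1 k
  (m, s.2 + (m - k))

def solutionGold_alt (nums : List Int) : Int :=
  let keys := (PySem.List.enumerate nums).map (fun p => p.2 - p.1)
  match keys with
  | [] => 0
  | k0 :: _ => (keys.foldl solutionGoldAltStep (k0, 0)).2

-- ===== PRECONDITION & SPEC =====
def Spec_solutionGold (nums : List Int) (out : Int) : Prop := out = solutionGold_alt nums
instance (nums : List Int) (out : Int) : Decidable (Spec_solutionGold nums out) := by unfold Spec_solutionGold; infer_instance

-- ===== CLAIM (what is proved, stated in full; the proofs are below) =====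
def Claim_equal_solutionGold : Prop := ∀ (nums : List Int), Dom_solutionGold nums → Spec_solutionGold nums (solutionGold nums)

-- ===== LEMMAS AND PROOFS =====

-- Proof-side intermediate: A's pass expressed as a scalar (prev, count) fold over the tail.
def pvPrevStep (s : Int × Int) (x : Int) : Int × Int :=
  let new := if s.1 < x then x else s.1 + 1
  (new, s.2 + (new - x))

theorem solutionGold_loopA (rest : List Int) :
    ∀ (u : List Int) (prev c : Int),
    ((PySem.List.pyRange (u.length : Int) ((u.length : Int) + (rest.length : Int)) 1).foldl
        solutionGoldStep (u ++ prev :: rest, c)).2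
    = (rest.foldl pvPrevStep (prev, c)).2 := by
  induction rest with
  | nil =>
      intro u prev c
      simp [PySem.List.pyRange_one_eq_nil]
  | cons x xs ih =>
      intro u prev c
      have hlt : (u.length : Int) < (u.length : Int) + ((x :: xs).length : Int) := by
        simp only [List.length_cons]; push_cast; omega
      rw [PySem.List.pyRange_one_cons hlt]
      have hget1 : PySem.List.pyGet? (u ++ prev :: x :: xs) ((u.length : Int) + 1)
          = some x := by
        rw [show ((u.length : Int) + 1) = ((u.length + 1 : Nat) : Int) by push_cast; ring]
        rw [PySem.List.pyGet?_natCast]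
        rw [List.getElem?_append_right (by omega)]
        simp
      have hget0 : PySem.List.pyGet? (u ++ prev :: x :: xs) (u.length : Int) = some prev := by
        rw [PySem.List.pyGet?_natCast]
        rw [List.getElem?_append_right (by omega)]
        simp
      have hset : (u ++ prev :: x :: xs).set ((u.length : Int) + 1).toNat (x + (prev - x + 1))
          = (u ++ [prev]) ++ (prev + 1) :: xs := by
        have : ((u.length : Int) + 1).toNat = (u ++ [prev]).length := by
          simp
        rw [this, List.append_cons u prev (x :: xs), List.set_append_right _ _ (le_refl _)]
        simp
        ring
      have ha : ((u.length : Int) + 1) = (((u ++ [prev]).length : Nat) : Int) := by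
        simp
      have hb : ((u.length : Int) + (((x :: xs).length : Nat) : Int))
          = (((u ++ [prev]).length : Nat) : Int) + ((xs.length : Nat) : Int) := by
        simp only [List.length_append, List.length_cons, List.length_nil]
        push_cast; ring
      simp only [List.foldl_cons, solutionGoldStep, hget1, hget0]
      by_cases hx : x ≤ prev
      · rw [if_pos hx, hset, ha, hb, ih (u ++ [prev]) (prev + 1) (c + (prev - x + 1))]
        simp only [pvPrevStep]
        rw [if_neg (by omega)]
        ring_nf
      · rw [if_neg hx]
        have heq : u ++ prev :: x :: xs = (u ++ [prev]) ++ x :: xs := by simp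
        rw [ha, hb, heq, ih (u ++ [prev]) x c]
        simp only [pvPrevStep]
        rw [if_pos (by omega)]
        ring_nf

-- The scalar (prev, count) fold is B's prefix-max fold in shifted coordinates: prev ↦ prev - i.
theorem solutionGold_loopB (xs : List Int) :
    ∀ (i p c : Int),
    (xs.foldl pvPrevStep (p, c)).2
    = (((PySem.List.enumerate xs (i + 1)).map (fun q => q.2 - q.1)).foldl
        solutionGoldAltStep (p - i, c)).2 := by
  induction xs with
  | nil => intro i p c; simp [PySem.List.enumerate_nil]
  | cons x t ih =>
      intro i p c
      rw [PySem.List.enumerate_cons]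
      simp only [List.map_cons, List.foldl_cons, pvPrevStep, solutionGoldAltStep]
      by_cases hx : p < x
      · rw [if_pos hx]
        have hm : max (p - i) (x - (i + 1)) = x - (i + 1) := by omega
        rw [hm, ih (i + 1) x (c + (x - x))]
        ring_nf
      · rw [if_neg hx]
        have hm : max (p - i) (x - (i + 1)) = (p + 1) - (i + 1) := by omega
        rw [hm, ih (i + 1) (p + 1) (c + (p + 1 - x))]
        ring_nf

-- ===== VERDICT (by name: the statement is the Claim_ definition above) =====
theorem solutionGold_spec : Claim_equal_solutionGold := by
  intro nums _
  unfold Spec_solutionGold solutionGold solutionGold_alt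
  match nums with
  | [] => simp [PySem.List.pyRange_one_eq_nil, PySem.List.enumerate_nil]
  | h :: t =>
      have hA := solutionGold_loopA t [] h 0
      simp only [List.length_nil, Nat.cast_zero, zero_add, List.nil_append] at hA
      rw [show ((((h :: t).length : Nat) : Int) - 1) = (t.length : Int) by simp]
      rw [hA]
      rw [PySem.List.enumerate_cons]
      simp only [List.map_cons, List.foldl_cons, solutionGoldAltStep]
      rw [solutionGold_loopB t 0 h 0]
      simp
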